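-- pv_equiv track=rewrite | github.com/igeryoung/WordCorrectSystemV2 | backend/app/algo/utils.py | jsonl_to_list
-- ===== SOURCE A (Python) =====
-- def jsonl_to_list(data):
--     data_dict = {}
--     for row in data:
--         for key, value in row.items():
--             if key not in data_dict:
--                 data_dict[key] = []
--             data_dict[key].append(value)
--     return data_dict
-- ===== SOURCE B (Python) =====
-- def jsonl_to_list(data):
--     keys = dict.fromkeys(key for row in data for key in row)
--     return {key: [row[key] for row in data if key in row] for key in keys}
-- ===== Notes on version B (the rewrite author's own statement) =====
-- stated objective: simpler
-- what changed: B separates key discovery (ordered dedup of all keys via dict.fromkeys) from column construction (one comprehension per key scanning data), instead of A's single interleaved pass that grows lists inside a dict; Pre_ only excludes association lists in which a row has duplicate keys, which no Python dict row can represent.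
import Mathlib
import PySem

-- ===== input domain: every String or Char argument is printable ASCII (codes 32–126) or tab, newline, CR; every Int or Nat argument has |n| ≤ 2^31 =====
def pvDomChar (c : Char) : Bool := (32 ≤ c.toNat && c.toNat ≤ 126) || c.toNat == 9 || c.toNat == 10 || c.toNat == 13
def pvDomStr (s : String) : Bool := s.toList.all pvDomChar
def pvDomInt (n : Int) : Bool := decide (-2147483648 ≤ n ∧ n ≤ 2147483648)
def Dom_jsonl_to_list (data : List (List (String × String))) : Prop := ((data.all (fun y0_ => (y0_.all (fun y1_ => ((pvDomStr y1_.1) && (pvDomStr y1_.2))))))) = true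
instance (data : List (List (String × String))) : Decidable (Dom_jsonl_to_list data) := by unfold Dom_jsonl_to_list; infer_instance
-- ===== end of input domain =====

-- B separates key discovery (ordered dedup) from per-key column construction instead of A's
-- single interleaved dict-building pass; objective: simpler decomposition, same result.

-- ===== PORT A =====
-- one forward pass: for each (key, value), create data_dict[key] = [] if absent, then append value
def jsonl_to_list (data : List (List (String × String))) : List (String × List String) :=
  (data.foldl
    (fun d row => row.foldl
      (fun d kv =>
        let d' := if d.contains kv.1 then d else d.insert kv.1 ([] : List String)
        d'.modify kv.1 [] (fun vs => vs ++ [kv.2]))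
      d)
    (PySem.Dict.empty : PySem.Dict String (List String))).items

-- ===== PORT B =====
-- phase 1: keys = dict.fromkeys(all keys) = ordered dedup; phase 2: column for key k is
-- [row[k] for row in data if k in row], i.e. the first-match lookup of k in each row that has it
def jsonl_to_list_alt (data : List (List (String × String))) : List (String × List String) :=
  let keys := PySem.List.dedup (data.flatMap (fun row => row.map Prod.fst))
  keys.map (fun k => (k, data.filterMap (fun row => List.lookup k row)))

-- ===== PRECONDITION & SPEC =====
-- Pre_ excludes only association lists in which some row has a duplicate key: a Python dict row
-- cannot represent such an input, so it corresponds to no input the Python programs ever receive.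
def Pre_jsonl_to_list (data : List (List (String × String))) : Prop :=
  ∀ row ∈ data, (row.map Prod.fst).Nodup
instance (data : List (List (String × String))) : Decidable (Pre_jsonl_to_list data) := by unfold Pre_jsonl_to_list; infer_instance

def pvWitness_jsonl_to_list : (List (List (String × String))) :=
  [[("a", "1")], [("a", "2"), ("b", "3")]]

def Spec_jsonl_to_list (data : List (List (String × String))) (out : List (String × List String)) : Prop := out = jsonl_to_list_alt data
instance (data : List (List (String × String))) (out : List (String × List String)) : Decidable (Spec_jsonl_to_list data out) := by unfold Spec_jsonl_to_list; infer_instance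

-- ===== CLAIM (what is proved, stated in full; the proofs are below) =====
def Claim_equal_jsonl_to_list : Prop := ∀ (data : List (List (String × String))), Dom_jsonl_to_list data → Pre_jsonl_to_list data → Spec_jsonl_to_list data (jsonl_to_list data)

-- ===== LEMMAS AND PROOFS =====

-- A's loop body is exactly the modify-with-default-[] step
theorem pv_astep_eq :
    (fun (d : PySem.Dict String (List String)) (kv : String × String) =>
        let d' := if d.contains kv.1 then d else d.insert kv.1 ([] : List String)
        d'.modify kv.1 [] (fun vs => vs ++ [kv.2]))
    = (fun d kv => d.modify kv.1 [] (fun vs => vs ++ [kv.2])) := by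
  funext d kv
  by_cases h : d.contains kv.1
  · simp [h]
  · simp only [h, if_neg, Bool.not_eq_true, PySem.Dict.modify,
      PySem.Dict.getD_insert_self, PySem.Dict.insert_insert_self]
    rw [PySem.Dict.getD_of_not_contains d [] (by simpa using h)]

-- in a row with distinct keys, the pairs matching k carry exactly the (first-match) looked-up value
theorem pv_row_lookup (k : String) (row : List (String × String))
    (h : (row.map Prod.fst).Nodup) :
    (row.filter (fun p => p.1 == k)).map Prod.snd = (List.lookup k row).toList := by
  induction row with
  | nil => simp
  | cons a t ih =>
    simp only [List.map_cons, List.nodup_cons] at h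
    by_cases hk : a.1 = k
    · have ht : t.filter (fun p => p.1 == k) = [] := by
        rw [List.filter_eq_nil_iff]
        intro p hp hpk
        exact h.1 (by
          have : p.1 = a.1 := by have := of_decide_eq_true hpk; simp_all
          exact this ▸ List.mem_map_of_mem hp)
      simp [List.lookup, hk, ht]
    · have hk' : (k == a.1) = false := beq_eq_false_iff_ne.mpr (fun e => hk e.symm)
      simp [List.lookup, hk, hk', ih h.2]

-- per key, the flattened-and-filtered values equal B's per-key comprehension
theorem pv_col (k : String) (data : List (List (String × String)))
    (hnd : ∀ row ∈ data, (row.map Prod.fst).Nodup) :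
    (data.flatten.filter (fun p => p.1 == k)).map Prod.snd
      = data.filterMap (fun row => List.lookup k row) := by
  induction data with
  | nil => simp
  | cons row t ih =>
    simp only [List.flatten_cons, List.filter_append, List.map_append, List.filterMap_cons]
    rw [pv_row_lookup k row (hnd row (List.mem_cons_self)),
        ih (fun r hr => hnd r (List.mem_cons_of_mem _ hr))]
    cases List.lookup k row <;> simp

theorem jsonl_to_list_eq_alt (data : List (List (String × String)))
    (hnd : ∀ row ∈ data, (row.map Prod.fst).Nodup) :
    jsonl_to_list data = jsonl_to_list_alt data := by
  unfold jsonl_to_list jsonl_to_list_alt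
  rw [pv_astep_eq]
  dsimp only
  rw [← List.foldl_flatten]
  -- both key lists are the ordered dedup of the flattened key sequence
  have hkeys : PySem.List.dedup (data.flatMap (fun row => row.map Prod.fst))
      = PySem.Set.update ([] : List String) (data.flatten.map Prod.fst) := by
    rw [PySem.List.dedup_eq_ofList, List.flatMap_def, ← List.map_flatten]
    rfl
  have hnodup : ((data.flatten.foldl
      (fun d p => d.modify p.1 [] (fun vs => vs ++ [p.2]))
      (PySem.Dict.empty : PySem.Dict String (List String)))).keys.Nodup :=
    PySem.Dict.nodup_keys_foldl_modify_key data.flatten Prod.fst []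
      (fun _ p vs => vs ++ [p.2]) _ (by simp [PySem.Dict.keys_empty])
  rw [PySem.Dict.items_eq_map_keys _ hnodup ([] : List String),
      PySem.Dict.keys_foldl_modify_key data.flatten Prod.fst []
        (fun _ p vs => vs ++ [p.2]) PySem.Dict.empty,
      PySem.Dict.keys_empty, hkeys]
  apply List.map_congr_left
  intro k _
  rw [PySem.Dict.getD_foldl_modify_append, PySem.Dict.getD_empty, List.nil_append,
      pv_col k data hnd]

-- ===== VERDICT (by name: the statement is the Claim_ definition above) =====
theorem jsonl_to_list_spec : Claim_equal_jsonl_to_list := by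
  intro data _ hpre
  unfold Spec_jsonl_to_list
  exact jsonl_to_list_eq_alt data hpre
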